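-- pv_equiv track=rewrite | github.com/Mzekala-Romanadze/Joker-Game | Game_Individually/Basic_Functions/calculate_scores_functions.py | create_set_scores_table
-- ===== SOURCE A (Python) =====
-- def create_set_scores_table(set_scores):
--     """
--     Creates scores table for 1 set, 4 hands.
--     :return: players and set scores
--     """
--
--     players_and_set_scores = {}
--
--     for game_set in set_scores:
--         for player, score in game_set.items():
--             if player not in players_and_set_scores:
--                 players_and_set_scores[player] = []
--             players_and_set_scores[player].append(score)
--
--     return players_and_set_scores
-- ===== SOURCE B (Python) =====
-- def create_set_scores_table(set_scores):
--     players = list(dict.fromkeys(p for gs in set_scores for p in gs))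
--     return {p: [gs[p] for gs in set_scores if p in gs] for p in players}
-- ===== Notes on version B (the rewrite author's own statement) =====
-- stated objective: alternative
-- what changed: Instead of one accumulating pass that grows per-player lists in a dict, B first collects the players in first-appearance order and then builds each player's score list with a separate filtering comprehension over the sets (inverted loop nesting).
import Mathlib
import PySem

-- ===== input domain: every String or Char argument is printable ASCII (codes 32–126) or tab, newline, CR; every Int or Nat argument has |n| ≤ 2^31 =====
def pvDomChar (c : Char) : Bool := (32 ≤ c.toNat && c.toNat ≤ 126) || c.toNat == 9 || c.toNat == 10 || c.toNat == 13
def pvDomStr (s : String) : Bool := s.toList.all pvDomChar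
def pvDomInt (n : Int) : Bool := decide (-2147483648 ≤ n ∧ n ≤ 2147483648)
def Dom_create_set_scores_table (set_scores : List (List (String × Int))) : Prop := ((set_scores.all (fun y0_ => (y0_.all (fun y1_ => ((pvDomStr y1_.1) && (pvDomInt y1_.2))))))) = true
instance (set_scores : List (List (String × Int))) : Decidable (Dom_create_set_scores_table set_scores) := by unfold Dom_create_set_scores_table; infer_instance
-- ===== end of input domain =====

-- B builds the first-appearance player list once and then one filtering comprehension per player
-- (inverted loop nesting) instead of A's single accumulating dict pass; alternative decomposition, not faster.

-- ===== PORT A =====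
-- single pass: for each set, for each (player, score), create the player's list if new, append the score
def create_set_scores_table (set_scores : List (List (String × Int))) : List (String × List Int) :=
  (set_scores.foldl
    (fun (players_and_set_scores : PySem.Dict String (List Int)) game_set =>
      (PySem.Dict.ofList game_set).items.foldl
        (fun d ps =>
          (if d.contains ps.1 then d else d.insert ps.1 []).modify ps.1 [] (fun l => l ++ [ps.2]))
        players_and_set_scores)
    PySem.Dict.empty).items

-- ===== PORT B =====
-- players = list(dict.fromkeys(p for gs in set_scores for p in gs));
-- {p: [gs[p] for gs in set_scores if p in gs] for p in players}
def create_set_scores_table_alt (set_scores : List (List (String × Int))) : List (String × List Int) :=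
  let players := PySem.List.dedup (set_scores.flatMap (fun gs => (PySem.Dict.ofList gs).keys))
  players.map (fun p => (p, set_scores.filterMap (fun gs => (PySem.Dict.ofList gs).get? p)))

-- ===== PRECONDITION & SPEC =====
def Spec_create_set_scores_table (set_scores : List (List (String × Int))) (out : List (String × List Int)) : Prop := out = create_set_scores_table_alt set_scores
instance (set_scores : List (List (String × Int))) (out : List (String × List Int)) : Decidable (Spec_create_set_scores_table set_scores out) := by unfold Spec_create_set_scores_table; infer_instance

-- ===== CLAIM (what is proved, stated in full; the proofs are below) =====
def Claim_equal_create_set_scores_table : Prop := ∀ (set_scores : List (List (String × Int))), Dom_create_set_scores_table set_scores → Spec_create_set_scores_table set_scores (create_set_scores_table set_scores)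

-- ===== LEMMAS AND PROOFS =====

-- A's "if new then start []; then append" step equals a plain modify-append step.
theorem pv_step_eq (d : PySem.Dict String (List Int)) (k : String) (v : Int) :
    (if d.contains k then d else d.insert k []).modify k [] (fun l => l ++ [v])
      = d.modify k [] (fun l => l ++ [v]) := by
  have hm : ∀ (d : PySem.Dict String (List Int)) (f : List Int → List Int),
      d.modify k [] f = d.insert k (f (d.getD k [])) := fun _ _ => rfl
  by_cases h : d.contains k = true
  · simp [h]
  · simp only [Bool.not_eq_true] at h
    rw [if_neg (by simp [h]), hm, hm, PySem.Dict.getD_insert_self,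
      PySem.Dict.insert_insert_self, PySem.Dict.getD_of_not_contains d [] h]

theorem pv_filterMap_eq_flatMap {α β : Type} (f : α → Option β) (l : List α) :
    l.filterMap f = l.flatMap (fun x => (f x).toList) := by
  induction l with
  | nil => rfl
  | cons x t ih => cases h : f x <;> simp [h, ih]

-- on a key-nodup association list, filtering by key and taking the values is get?.toList
theorem pv_filter_eq_get? (p : String) (l : List (String × Int))
    (hn : (l.map Prod.fst).Nodup) :
    (l.filter (fun q => q.1 == p)).map Prod.snd = ((PySem.Dict.mk l).get? p).toList := by
  induction l with
  | nil => rfl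
  | cons x t ih =>
    simp only [List.map_cons, List.nodup_cons] at hn
    rw [List.filter_cons, PySem.Dict.get?_mk_cons]
    by_cases h : (x.1 == p) = true
    · have hp : p = x.1 := (beq_iff_eq.mp h).symm
      have ht : t.filter (fun q => q.1 == p) = [] := by
        rw [List.filter_eq_nil_iff]
        intro q hq hc
        exact hn.1 (by rw [← hp, ← (beq_iff_eq.mp hc)]; exact List.mem_map_of_mem hq)
      simp [h, ht]
    · simp only [h, if_false, Bool.false_eq_true]
      exact ih hn.2

theorem create_set_scores_table_eq (set_scores : List (List (String × Int))) :
    create_set_scores_table set_scores = create_set_scores_table_alt set_scores := by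
  unfold create_set_scores_table create_set_scores_table_alt
  -- the nested loop is one flat modify-append loop over all pairs
  have hstep : ∀ (acc : PySem.Dict String (List Int)) (gs : List (String × Int)),
      (PySem.Dict.ofList gs).items.foldl
        (fun d ps =>
          (if d.contains ps.1 then d else d.insert ps.1 []).modify ps.1 [] (fun l => l ++ [ps.2]))
        acc
      = (PySem.Dict.ofList gs).items.foldl
          (fun d ps => d.modify ps.1 [] (fun l => l ++ [ps.2])) acc := by
    intro acc gs
    apply PySem.List.foldl_congr_mem
    intro d ps _
    exact pv_step_eq d ps.1 ps.2
  have hflat :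
      set_scores.foldl
        (fun (acc : PySem.Dict String (List Int)) game_set =>
          (PySem.Dict.ofList game_set).items.foldl
            (fun d ps =>
              (if d.contains ps.1 then d else d.insert ps.1 []).modify ps.1 [] (fun l => l ++ [ps.2]))
            acc)
        PySem.Dict.empty
      = (set_scores.flatMap (fun gs => (PySem.Dict.ofList gs).items)).foldl
          (fun d ps => d.modify ps.1 [] (fun l => l ++ [ps.2])) PySem.Dict.empty := by
    rw [List.flatMap_def, List.foldl_flatten, List.foldl_map]
    apply PySem.List.foldl_congr_mem
    intro acc gs _
    exact hstep acc gs
  rw [hflat]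
  set pairs := set_scores.flatMap (fun gs => (PySem.Dict.ofList gs).items) with hpairs
  set D := pairs.foldl (fun d ps => d.modify ps.1 [] (fun l => l ++ [ps.2])) PySem.Dict.empty with hD
  have hkeys : D.keys = PySem.Set.ofList (pairs.map Prod.fst) := by
    rw [hD, PySem.Dict.keys_foldl_modify_key pairs Prod.fst [] (fun _ ps l => l ++ [ps.2])]
    simp [PySem.Dict.keys_empty, PySem.Set.update_nil_left]
  have hnodup : D.keys.Nodup := hkeys ▸ PySem.Set.nodup_ofList _
  have hplayers : PySem.List.dedup (set_scores.flatMap (fun gs => (PySem.Dict.ofList gs).keys))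
      = D.keys := by
    rw [hkeys, PySem.List.dedup_eq_ofList, hpairs, List.map_flatMap]
    rfl
  rw [hplayers, PySem.Dict.items_eq_map_keys D hnodup []]
  refine List.map_congr_left (fun k _ => ?_)
  have hgetD : D.getD k [] = (pairs.filter (fun q => q.1 == k)).map Prod.snd := by
    rw [hD, PySem.Dict.getD_foldl_modify_append pairs PySem.Dict.empty k, PySem.Dict.getD_empty]
    rfl
  rw [hgetD, hpairs]
  refine congrArg (fun z => (k, z)) ?_
  rw [List.filter_flatMap, List.map_flatMap, pv_filterMap_eq_flatMap]
  refine List.flatMap_congr (fun gs _ => ?_)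
  have hn : ((PySem.Dict.ofList gs).items.map Prod.fst).Nodup :=
    PySem.Dict.nodup_keys_ofList gs
  simpa using pv_filter_eq_get? k (PySem.Dict.ofList gs).items hn

-- ===== VERDICT (by name: the statement is the Claim_ definition above) =====
theorem create_set_scores_table_spec : Claim_equal_create_set_scores_table := by
  intro set_scores _
  exact create_set_scores_table_eq set_scores
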